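-- pv_equiv track=rewrite | github.com/gtadeus/LeetCodeChallenge2009 | week01/day04.py | check_valid_part
-- ===== SOURCE A (Python) =====
-- def check_valid_part(list_):
--     ret_val = True
--     if (len(list_)>1):
--         for k in list_:
--             for l in list_:
--                 for i in k:
--                     if k != l:
--                         if l.find(i) != -1:
--                             ret_val = False
--     return ret_val
-- ===== SOURCE B (Python) =====
-- def check_valid_part(list_):
--     owner = {}
--     for s in list_:
--         for c in s:
--             if owner.setdefault(c, s) != s:
--                 return False
--     return True
-- ===== Notes on version B (the rewrite author's own statement) =====
-- stated objective: faster
-- what changed: Replaced the all-pairs nested scan (every char of every string searched in every other string) by a single pass that records each character's owning string value in a dict and fails on the first character already owned by a different value, with early return.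
import Mathlib
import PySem

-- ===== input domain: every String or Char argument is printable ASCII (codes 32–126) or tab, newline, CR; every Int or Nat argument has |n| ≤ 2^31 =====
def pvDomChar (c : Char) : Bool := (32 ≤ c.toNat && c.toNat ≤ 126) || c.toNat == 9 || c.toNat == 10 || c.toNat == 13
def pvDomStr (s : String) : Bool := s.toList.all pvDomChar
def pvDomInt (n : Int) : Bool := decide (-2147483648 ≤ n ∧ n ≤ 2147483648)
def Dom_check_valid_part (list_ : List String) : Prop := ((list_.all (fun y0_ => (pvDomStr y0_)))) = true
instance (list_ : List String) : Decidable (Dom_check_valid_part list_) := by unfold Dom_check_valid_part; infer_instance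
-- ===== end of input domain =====

-- B replaces A's all-pairs nested scan by one pass with a char → owning-string dict and early return.

-- ===== PORT A =====
-- literal port of A: flag ret_val, guarded by len>1, triple nested loop;
-- 'l.find(i) != -1' for the 1-char string i ported as PySem.Str.find l (String.ofList [i]) ≠ -1 (exact)
def check_valid_part (list_ : List String) : Bool :=
  if 1 < list_.length then
    list_.foldl (fun r k =>
      list_.foldl (fun r l =>
        k.toList.foldl (fun r i =>
          if k ≠ l then
            (if PySem.Str.find l (String.ofList [i]) ≠ -1 then false else r)
          else r) r) r) true
  else true

-- ===== PORT B =====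
-- inner loop of B: 'for c in s: if owner.setdefault(c, s) != s: return False'
-- (none = early 'return False'; some owner' = loop finished with updated dict)
def pvGoChars (s : String) : List Char → PySem.Dict Char String → Option (PySem.Dict Char String)
  | [], owner => some owner
  | c :: rest, owner =>
      match owner.get? c with
      | some o => if o ≠ s then none else pvGoChars s rest owner
      | none => pvGoChars s rest (owner.insert c s)

-- outer loop of B over the strings
def pvGoStrs : List String → PySem.Dict Char String → Bool
  | [], _ => true
  | s :: rest, owner =>
      match pvGoChars s s.toList owner with
      | none => false
      | some owner' => pvGoStrs rest owner'

def check_valid_part_alt (list_ : List String) : Bool :=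
  pvGoStrs list_ PySem.Dict.empty

-- ===== PRECONDITION & SPEC =====
def Spec_check_valid_part (list_ : List String) (out : Bool) : Prop := out = check_valid_part_alt list_
instance (list_ : List String) (out : Bool) : Decidable (Spec_check_valid_part list_ out) := by unfold Spec_check_valid_part; infer_instance

-- ===== CLAIM (what is proved, stated in full; the proofs are below) =====
def Claim_equal_check_valid_part : Prop := ∀ (list_ : List String), Dom_check_valid_part list_ → Spec_check_valid_part list_ (check_valid_part list_)

-- ===== LEMMAS AND PROOFS =====

-- the common meaning of both programs: no two distinct string values share a character
def pvNoConf (l : List String) : Prop :=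
  ∀ k ∈ l, ∀ t ∈ l, k ≠ t → ∀ c ∈ k.toList, c ∉ t.toList

-- Boolean all-pairs form of the condition (A's loops compute this flag)
def pvNoConfB (l : List String) : Bool :=
  l.all (fun k => l.all (fun t =>
    k.toList.all (fun i => !(decide (k ≠ t) && decide (i ∈ t.toList)))))

lemma pvNoConfB_iff (l : List String) : pvNoConfB l = true ↔ pvNoConf l := by
  simp only [pvNoConfB, pvNoConf, List.all_eq_true, Bool.not_eq_eq_eq_not, Bool.not_true,
    Bool.and_eq_false_imp, decide_eq_true_eq, decide_eq_false_iff_not]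
  constructor
  · intro h k hk t ht hkt c hc
    exact h k hk t ht c hc hkt
  · intro h k hk t ht c hc hkt
    exact h k hk t ht hkt c hc

-- A's innermost loop computes r && all …
lemma foldl_inner (k t : String) : ∀ (cs : List Char) (r : Bool),
    cs.foldl (fun r i =>
      if k ≠ t then
        (if PySem.Str.find t (String.ofList [i]) ≠ -1 then false else r)
      else r) r
    = (r && cs.all (fun i => !(decide (k ≠ t) && decide (i ∈ t.toList)))) := by
  intro cs
  induction cs with
  | nil => intro r; simp
  | cons c rest ih =>
    intro r
    rw [List.foldl_cons, ih, List.all_cons]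
    have hf : (PySem.Str.find t (String.ofList [c]) ≠ -1) ↔ c ∈ t.toList := by
      simpa [List.singleton_infix_iff] using
        (not_iff_not.mpr (PySem.Chars.find_eq_neg_one_iff t.toList [c]))
    have hstep : (if k ≠ t then
        (if PySem.Str.find t (String.ofList [c]) ≠ -1 then false else r) else r)
        = (r && !(decide (k ≠ t) && decide (c ∈ t.toList))) := by
      by_cases hkt : k = t
      · rw [if_neg (by simp [hkt])]
        simp [hkt]
      · rw [if_pos hkt]
        by_cases hc : c ∈ t.toList
        · rw [if_pos (hf.mpr hc)]
          simp [hkt, hc]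
        · rw [if_neg (fun hx => hc (hf.mp hx))]
          simp [hkt, hc]
    rw [hstep, Bool.and_assoc]

-- a foldl of && is all
lemma foldl_and (g : String → Bool) : ∀ (xs : List String) (r : Bool),
    xs.foldl (fun r x => r && g x) r = (r && xs.all g) := by
  intro xs
  induction xs with
  | nil => intro r; simp
  | cons x rest ih => intro r; simp [List.foldl_cons, ih, Bool.and_assoc]

lemma check_valid_part_eq_noConfB (l : List String) :
    check_valid_part l = pvNoConfB l := by
  unfold check_valid_part pvNoConfB
  by_cases h : 1 < l.length
  · simp only [h, if_pos]
    calc l.foldl (fun r k =>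
          l.foldl (fun r t =>
            k.toList.foldl (fun r i =>
              if k ≠ t then
                (if PySem.Str.find t (String.ofList [i]) ≠ -1 then false else r)
              else r) r) r) true
        = l.foldl (fun r k =>
            l.foldl (fun r t =>
              r && k.toList.all (fun i => !(decide (k ≠ t) && decide (i ∈ t.toList)))) r) true := by
          apply PySem.List.foldl_congr_mem
          intro r k _
          apply PySem.List.foldl_congr_mem
          intro r' t _
          exact foldl_inner k t k.toList r'
      _ = l.foldl (fun r k =>
            r && l.all (fun t => k.toList.all (fun i => !(decide (k ≠ t) && decide (i ∈ t.toList))))) true := by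
          apply PySem.List.foldl_congr_mem
          intro r k _
          exact foldl_and _ l r
      _ = l.all (fun k => l.all (fun t => k.toList.all (fun i => !(decide (k ≠ t) && decide (i ∈ t.toList))))) := by
          rw [foldl_and]; simp
  · -- length 0 or 1: the flag is never touched and pvNoConfB is vacuously true
    rw [if_neg h]
    rcases l with _ | ⟨a, tl⟩
    · simp
    · rcases tl with _ | ⟨b, tl⟩
      · simp
      · simp at h

-- B's inner loop fails iff some char of s is already owned by a different value
lemma goChars_none_iff (s : String) : ∀ (cs : List Char) (owner : PySem.Dict Char String),
    pvGoChars s cs owner = none ↔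
      ∃ c ∈ cs, ∃ v, owner.get? c = some v ∧ v ≠ s := by
  intro cs
  induction cs with
  | nil => intro owner; simp [pvGoChars]
  | cons c rest ih =>
    intro owner
    cases hg : owner.get? c with
    | some o =>
      simp only [pvGoChars, hg]
      by_cases ho : o = s
      · rw [if_neg (by simp [ho]), ih]
        constructor
        · rintro ⟨c', hc', v, hv, hvs⟩; exact ⟨c', List.mem_cons_of_mem _ hc', v, hv, hvs⟩
        · rintro ⟨c', hc', v, hv, hvs⟩
          rcases List.mem_cons.mp hc' with rfl | hc'
          · rw [hg] at hv; cases hv; exact absurd ho hvs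
          · exact ⟨c', hc', v, hv, hvs⟩
      · rw [if_pos ho]
        constructor
        · intro _; exact ⟨c, List.mem_cons_self, o, hg, ho⟩
        · intro _; rfl
    | none =>
      simp only [pvGoChars, hg]
      rw [ih]
      constructor
      · rintro ⟨c', hc', v, hv, hvs⟩
        rcases eq_or_ne c' c with rfl | hne
        · rw [PySem.Dict.get?_insert_self] at hv; cases hv; exact absurd rfl hvs
        · rw [PySem.Dict.get?_insert_of_ne _ _ hne] at hv
          exact ⟨c', List.mem_cons_of_mem _ hc', v, hv, hvs⟩
      · rintro ⟨c', hc', v, hv, hvs⟩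
        rcases List.mem_cons.mp hc' with rfl | hc'
        · rw [hg] at hv; cases hv
        · rcases eq_or_ne c' c with rfl | hne
          · rw [hg] at hv; cases hv
          · exact ⟨c', hc', v, by rw [PySem.Dict.get?_insert_of_ne _ _ hne]; exact hv, hvs⟩

-- on success B's inner loop extends the dict exactly by the fresh chars of s
lemma goChars_some_get? (s : String) : ∀ (cs : List Char) (owner owner' : PySem.Dict Char String),
    pvGoChars s cs owner = some owner' → ∀ c',
      owner'.get? c' = (match owner.get? c' with
        | some v => some v
        | none => if c' ∈ cs then some s else none) := by
  intro cs
  induction cs with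
  | nil =>
    intro owner owner' h c'
    simp only [pvGoChars, Option.some.injEq] at h
    subst h
    cases owner.get? c' <;> simp
  | cons c rest ih =>
    intro owner owner' h c'
    cases hg : owner.get? c with
    | some o =>
      simp only [pvGoChars, hg] at h
      by_cases ho : o = s
      · rw [if_neg (by simp [ho])] at h
        rw [ih owner owner' h c']
        cases hgc' : owner.get? c' with
        | some v => simp
        | none =>
          rcases eq_or_ne c' c with rfl | hne
          · rw [hg] at hgc'; cases hgc'
          · simp [List.mem_cons, hne]
      · rw [if_pos ho] at h; cases h
    | none =>
      simp only [pvGoChars, hg] at h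
      rw [ih _ owner' h c']
      rcases eq_or_ne c' c with rfl | hne
      · rw [PySem.Dict.get?_insert_self, hg]
        simp
      · rw [PySem.Dict.get?_insert_of_ne _ _ hne]
        cases hgc' : owner.get? c' with
        | some v => simp
        | none => simp [List.mem_cons, hne]

-- the dict invariant: owner maps c to v exactly when v is a processed string containing c
def pvInv (processed : List String) (owner : PySem.Dict Char String) : Prop :=
  ∀ c v, owner.get? c = some v ↔ (v ∈ processed ∧ c ∈ v.toList)

lemma goStrs_iff : ∀ (rest processed : List String) (owner : PySem.Dict Char String),
    pvInv processed owner → pvNoConf processed →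
    (pvGoStrs rest owner = true ↔ pvNoConf (processed ++ rest)) := by
  intro rest
  induction rest with
  | nil =>
    intro processed owner _ hnc
    simpa [pvGoStrs] using hnc
  | cons s rest ih =>
    intro processed owner hinv hnc
    simp only [pvGoStrs]
    cases hg : pvGoChars s s.toList owner with
    | none =>
      rcases (goChars_none_iff s s.toList owner).mp hg with ⟨c, hcs, v, hv, hvs⟩
      rcases (hinv c v).mp hv with ⟨hvp, hcv⟩
      refine iff_of_false (by simp) ?_
      intro hncAll
      exact (hncAll s (List.mem_append.mpr (Or.inr List.mem_cons_self))
        v (List.mem_append.mpr (Or.inl hvp)) (fun h => hvs h.symm) c hcs) hcv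
    | some owner' =>
      have hnofail : ¬ ∃ c ∈ s.toList, ∃ v, owner.get? c = some v ∧ v ≠ s := by
        rw [← goChars_none_iff]
        simp [hg]

      have hget := goChars_some_get? s s.toList owner owner' hg
      have hinv' : pvInv (processed ++ [s]) owner' := by
        intro c v
        rw [hget c]
        cases hgc : owner.get? c with
        | some w =>
          rcases (hinv c w).mp hgc with ⟨hwp, hcw⟩
          constructor
          · rintro h; cases h
            exact ⟨List.mem_append.mpr (Or.inl hwp), hcw⟩
          · rintro ⟨hv, hcv⟩
            rcases List.mem_append.mp hv with hvp | hvs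
            · rw [(hinv c v).mpr ⟨hvp, hcv⟩] at hgc; cases hgc; rfl
            · have hv' : v = s := List.mem_singleton.mp hvs
              subst hv'
              by_contra hne
              exact hnofail ⟨c, hcv, w, hgc, fun he => hne (by rw [he])⟩
        | none =>
          constructor
          · intro h
            by_cases hc : c ∈ s.toList
            · rw [if_pos hc] at h; cases h
              exact ⟨List.mem_append.mpr (Or.inr List.mem_cons_self), hc⟩
            · rw [if_neg hc] at h; cases h
          · rintro ⟨hv, hcv⟩
            rcases List.mem_append.mp hv with hvp | hvs
            · rw [(hinv c v).mpr ⟨hvp, hcv⟩] at hgc; cases hgc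
            · have hv' : v = s := List.mem_singleton.mp hvs
              subst hv'
              rw [if_pos hcv]
      have hnc' : pvNoConf (processed ++ [s]) := by
        intro k hk t ht hkt c hck hct
        rcases List.mem_append.mp hk with hkp | hks
        · rcases List.mem_append.mp ht with htp | hts
          · exact hnc k hkp t htp hkt c hck hct
          · have ht' : t = s := List.mem_singleton.mp hts
            subst ht'
            exact hnofail ⟨c, hct, k, (hinv c k).mpr ⟨hkp, hck⟩, hkt⟩
        · have hk' : k = s := List.mem_singleton.mp hks
          rcases List.mem_append.mp ht with htp | hts
          · exact hnofail ⟨c, hk' ▸ hck, t, (hinv c t).mpr ⟨htp, hct⟩,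
              fun he => hkt (hk'.trans he.symm)⟩
          · exact hkt (hk'.trans (List.mem_singleton.mp hts).symm)
      have hmain := ih (processed ++ [s]) owner' hinv' hnc'
      rw [hmain, List.append_assoc]
      simp

lemma alt_iff (l : List String) : check_valid_part_alt l = true ↔ pvNoConf l := by
  have hinv : pvInv [] PySem.Dict.empty := by
    intro c v; simp [PySem.Dict.get?_empty]
  have hnc : pvNoConf ([] : List String) := by intro k hk; cases hk
  have h := goStrs_iff l [] PySem.Dict.empty hinv hnc
  simpa [check_valid_part_alt] using h

-- ===== VERDICT (by name: the statement is the Claim_ definition above) =====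
theorem check_valid_part_spec : Claim_equal_check_valid_part := by
  intro l _
  unfold Spec_check_valid_part
  rw [check_valid_part_eq_noConfB]
  rw [Bool.eq_iff_iff, pvNoConfB_iff, ← alt_iff]
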